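-- pv_equiv track=rewrite | github.com/gitE0Z9/pytorch-implementations | torchlake/semantic_segmentation/models/hdc_duc/network.py | is_hdc_rule_valid
-- ===== SOURCE A (Python) =====
-- from typing import Sequence
--
-- def is_hdc_rule_valid(dilations: Sequence[int], kernel: int) -> bool:
--     if len(dilations) < 2:
--         return True
--
--     dilations = dilations[::-1]
--     M_i = dilations[0]
--     for i in range(1, len(dilations)):
--         r_next, r_i = dilations[i - 1], dilations[i]
--         if r_next < r_i:
--             M_i = r_i
--         else:
--             M_i = max(r_i, M_i - 2 * r_i, 2 * r_i - M_i)
--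
--         if r_i != M_i:
--             return False
--         # M_2 == r_2, that is i = 3
--         # if i == len(dilations) - 2 and M_i > kernel:
--         #     return False
--
--     return True
-- ===== SOURCE B (Python) =====
-- def is_hdc_rule_valid(dilations, kernel):
--     return all(not (later >= earlier and later > 3 * earlier)
--                for earlier, later in zip(dilations, dilations[1:]))
-- ===== Notes on version B (the rewrite author's own statement) =====
-- stated objective: simpler
-- what changed: Replaces the reversed traversal with running accumulator M_i and three-way max by a single forward pairwise scan: the rule fails exactly when some consecutive pair has later >= earlier and later > 3*earlier, so no reversal and no accumulator are needed.
import Mathlib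
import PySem

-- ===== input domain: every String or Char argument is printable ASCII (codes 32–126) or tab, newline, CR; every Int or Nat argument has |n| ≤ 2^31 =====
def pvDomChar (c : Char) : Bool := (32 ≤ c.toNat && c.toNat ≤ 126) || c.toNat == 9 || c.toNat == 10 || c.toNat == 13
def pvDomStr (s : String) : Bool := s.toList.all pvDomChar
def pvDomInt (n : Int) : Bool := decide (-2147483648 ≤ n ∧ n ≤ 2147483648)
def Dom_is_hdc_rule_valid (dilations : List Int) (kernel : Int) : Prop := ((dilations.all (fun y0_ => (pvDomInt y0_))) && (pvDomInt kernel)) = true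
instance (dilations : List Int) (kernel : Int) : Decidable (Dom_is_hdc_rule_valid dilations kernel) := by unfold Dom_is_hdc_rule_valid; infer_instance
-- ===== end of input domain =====

-- B replaces A's reversed traversal with running accumulator by a single forward
-- pairwise scan over consecutive elements (objective: simpler).

-- ===== PORT A =====
-- the `for i in range(1, len(dilations))` loop with early `return False`
def is_hdc_rule_valid_loop (rev : List Int) (M : Int) (i : Nat) : Bool :=
  if _h : i < rev.length then
    let r_next := rev.getD (i - 1) 0
    let r_i := rev.getD i 0
    let M' := if r_next < r_i then r_i else max r_i (max (M - 2 * r_i) (2 * r_i - M))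
    if r_i ≠ M' then false
    else is_hdc_rule_valid_loop rev M' (i + 1)
  else true
termination_by rev.length - i

def is_hdc_rule_valid (dilations : List Int) (kernel : Int) : Bool :=
  if dilations.length < 2 then true
  else
    let rev := dilations.reverse      -- dilations[::-1]
    is_hdc_rule_valid_loop rev (rev.getD 0 0) 1

-- ===== PORT B =====
def is_hdc_rule_valid_alt (dilations : List Int) (kernel : Int) : Bool :=
  (dilations.zip dilations.tail).all
    (fun p => !(p.2 ≥ p.1 && p.2 > 3 * p.1))

-- ===== PRECONDITION & SPEC =====
def Spec_is_hdc_rule_valid (dilations : List Int) (kernel : Int) (out : Bool) : Prop := out = is_hdc_rule_valid_alt dilations kernel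
instance (dilations : List Int) (kernel : Int) (out : Bool) : Decidable (Spec_is_hdc_rule_valid dilations kernel out) := by unfold Spec_is_hdc_rule_valid; infer_instance

-- ===== CLAIM (what is proved, stated in full; the proofs are below) =====
def Claim_equal_is_hdc_rule_valid : Prop := ∀ (dilations : List Int) (kernel : Int), Dom_is_hdc_rule_valid dilations kernel → Spec_is_hdc_rule_valid dilations kernel (is_hdc_rule_valid dilations kernel)

-- ===== LEMMAS AND PROOFS =====

def pairOK (earlier later : Int) : Bool := !(later ≥ earlier && later > 3 * earlier)

-- B's value, computed structurally over the original list
def pairsOK : List Int → Bool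
  | [] => true
  | [_] => true
  | a :: b :: t => pairOK a b && pairsOK (b :: t)

-- consecutive-pair check over the reversed list (later element comes first)
def revPairsOK : List Int → Bool
  | [] => true
  | [_] => true
  | a :: b :: t => pairOK b a && revPairsOK (b :: t)

theorem alt_eq_pairsOK (xs : List Int) (k : Int) :
    is_hdc_rule_valid_alt xs k = pairsOK xs := by
  induction xs with
  | nil => rfl
  | cons a xs ih =>
    cases xs with
    | nil => rfl
    | cons b t =>
      simp only [is_hdc_rule_valid_alt, List.tail_cons, List.zip_cons_cons,
        List.all_cons, pairsOK] at *
      rw [← ih]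
      rfl

theorem revPairsOK_append (l : List Int) (x : Int) :
    revPairsOK (l ++ [x]) =
      (revPairsOK l && (match l.getLast? with | none => true | some a => pairOK x a)) := by
  induction l with
  | nil => simp [revPairsOK]
  | cons a l ih =>
    cases l with
    | nil => simp [revPairsOK, Bool.and_comm]
    | cons b t =>
      simp only [List.cons_append, revPairsOK, List.getLast?_cons_cons]
      rw [← List.cons_append, ih, Bool.and_assoc]

theorem revPairsOK_reverse (xs : List Int) : revPairsOK xs.reverse = pairsOK xs := by
  induction xs with
  | nil => rfl
  | cons a xs ih =>
    rw [List.reverse_cons, revPairsOK_append, ih, List.getLast?_reverse]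
    cases xs with
    | nil => rfl
    | cons b t => simp [pairsOK, Bool.and_comm]

theorem loop_eq_revPairsOK (ys : List Int) (i : Nat) (h1 : 1 ≤ i) (h2 : i ≤ ys.length) :
    is_hdc_rule_valid_loop ys (ys.getD (i - 1) 0) i = revPairsOK (ys.drop (i - 1)) := by
  rw [is_hdc_rule_valid_loop]
  by_cases h : i < ys.length
  · have hi1 : i - 1 < ys.length := by omega
    have hstep : i - 1 + 1 = i := by omega
    have hd1 : ys.drop (i - 1) = ys[i - 1] :: ys.drop i := by
      rw [List.drop_eq_getElem_cons hi1, hstep]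
    have hd2 : ys.drop i = ys[i] :: ys.drop (i + 1) := List.drop_eq_getElem_cons h
    have ga : ys.getD (i - 1) 0 = ys[i - 1] := List.getD_eq_getElem ys 0 hi1
    have gb : ys.getD i 0 = ys[i] := List.getD_eq_getElem ys 0 h
    have hrec' : is_hdc_rule_valid_loop ys (ys.getD (i + 1 - 1) 0) (i + 1)
        = revPairsOK (ys.drop (i + 1 - 1)) :=
      loop_eq_revPairsOK ys (i + 1) (by omega) (by omega)
    simp only [Nat.add_sub_cancel, gb] at hrec'
    simp only [h, dif_pos, ga, gb, hd1, hd2, revPairsOK]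
    by_cases hab : ys[i - 1] < ys[i]
    · have hok : pairOK ys[i] ys[i - 1] = true := by
        simp only [pairOK]; simp; omega
      rw [if_pos hab]
      simp [hok, ← hd2, hrec']
    · by_cases h3 : ys[i] * 3 < ys[i - 1]
      · have hM : ys[i] ≠ max ys[i] (max (ys[i - 1] - 2 * ys[i]) (2 * ys[i] - ys[i - 1])) := by
          have : ys[i - 1] - 2 * ys[i] ≤
              max ys[i] (max (ys[i - 1] - 2 * ys[i]) (2 * ys[i] - ys[i - 1])) :=
            le_trans (le_max_left _ _) (le_max_right _ _)
          omega
        have hok : pairOK ys[i] ys[i - 1] = false := by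
          simp only [pairOK]; simp; omega
        rw [if_neg hab]
        simp [hM, hok]
      · have hM : ys[i] = max ys[i] (max (ys[i - 1] - 2 * ys[i]) (2 * ys[i] - ys[i - 1])) := by
          rw [max_def, max_def]
          split_ifs <;> omega
        have hok : pairOK ys[i] ys[i - 1] = true := by
          simp only [pairOK]; simp; omega
        rw [if_neg hab, ← hM]
        simp [hok, ← hd2, hrec']
  · have : i = ys.length := by omega
    subst this
    simp only [lt_irrefl, dif_neg, not_false_eq_true]
    cases ys with
    | nil => rfl
    | cons x t =>
      have hl : (x :: t).length - 1 < (x :: t).length := by simp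
      rw [List.drop_eq_getElem_cons hl]
      have h1' : (x :: t).length - 1 + 1 = (x :: t).length := by simp
      rw [h1', List.drop_length]
      rfl
termination_by ys.length - i

theorem a_eq_pairsOK (xs : List Int) (k : Int) : is_hdc_rule_valid xs k = pairsOK xs := by
  rw [is_hdc_rule_valid]
  by_cases h : xs.length < 2
  · rw [if_pos h]
    match xs, h with
    | [], _ => rfl
    | [_], _ => rfl
  · rw [if_neg h]
    have h1 : 1 ≤ xs.reverse.length := by simp; omega
    have := loop_eq_revPairsOK xs.reverse 1 le_rfl h1
    simpa [revPairsOK_reverse] using this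

-- ===== VERDICT (by name: the statement is the Claim_ definition above) =====
theorem is_hdc_rule_valid_spec : Claim_equal_is_hdc_rule_valid := by
  intro dil k _
  unfold Spec_is_hdc_rule_valid
  rw [a_eq_pairsOK, alt_eq_pairsOK]
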